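-- pv_equiv track=rewrite | github.com/dplocki/project-euler | p0084.py | build_modal_string
-- ===== SOURCE A (Python) =====
-- from typing import Dict, Generator
--
-- def build_modal_string(results: Dict[int, int]) -> str:
--     return ''.join(
--             str(v).zfill(2)
--             for v in list(v for v, _ in sorted(
--                     results.items(),
--                     key=lambda x:x[1],
--                     reverse=True)
--                 )[:3])
-- ===== SOURCE B (Python) =====
-- def build_modal_string(results):
--     remaining = list(results.items())
--     parts = []
--     for _ in range(3):
--         if not remaining:
--             break
--         best = remaining[0]
--         for item in remaining[1:]:
--             if best[1] < item[1]:
--                 best = item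
--         parts.append(str(best[0]).zfill(2))
--         remaining.remove(best)
--     return ''.join(parts)
-- ===== Notes on version B (the rewrite author's own statement) =====
-- stated objective: alternative
-- what changed: Replaces the full stable descending sort of all items with up to three selection scans: each round finds the first maximum-value item in insertion order, emits its zero-padded key, and removes it from the remaining list.
import Mathlib
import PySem

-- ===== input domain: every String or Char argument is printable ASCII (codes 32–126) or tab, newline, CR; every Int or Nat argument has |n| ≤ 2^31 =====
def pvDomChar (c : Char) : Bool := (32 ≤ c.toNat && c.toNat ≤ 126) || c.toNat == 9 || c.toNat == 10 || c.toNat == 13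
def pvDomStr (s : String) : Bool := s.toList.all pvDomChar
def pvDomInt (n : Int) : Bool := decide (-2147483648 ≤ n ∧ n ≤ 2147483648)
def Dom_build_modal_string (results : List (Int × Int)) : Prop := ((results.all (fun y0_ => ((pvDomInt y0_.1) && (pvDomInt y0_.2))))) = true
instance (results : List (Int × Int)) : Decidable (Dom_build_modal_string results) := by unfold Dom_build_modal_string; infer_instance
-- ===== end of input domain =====

-- B replaces A's full stable sort by up to three first-maximum selection scans (same result, no sort); objective: alternative.


-- ===== PORT A =====
-- str(v).zfill(2) for a key v
def pvFmt (p : Int × Int) : String := PySem.Str.zfill (PySem.Int.toStr p.1) 2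

-- A: sorted(results.items(), key=lambda x: x[1], reverse=True), take 3 keys, format, join
def build_modal_string (results : List (Int × Int)) : String :=
  PySem.Str.join ""
    (((PySem.List.sorted (PySem.Dict.ofList results).items (fun x => x.2) true).take 3).map pvFmt)

-- ===== PORT B =====
-- first element of best :: t with the strictly larger value wins later ('if best[1] < item[1]: best = item')
def pvFirstMax (best : Int × Int) (t : List (Int × Int)) : Int × Int :=
  t.foldl (fun b x => if b.2 < x.2 then x else b) best

-- up to n selection rounds: pick the first maximum-value item, emit its formatted key, remove it
-- ('remaining.remove(best)' is List.erase: best is always a member, so Python's remove cannot raise)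
def pvSelect : Nat → List (Int × Int) → List String
  | 0, _ => []
  | _ + 1, [] => []
  | n + 1, h :: t =>
      let best := pvFirstMax h t
      pvFmt best :: pvSelect n ((h :: t).erase best)

def build_modal_string_alt (results : List (Int × Int)) : String :=
  PySem.Str.join "" (pvSelect 3 (PySem.Dict.ofList results).items)

-- ===== PRECONDITION & SPEC =====
def Spec_build_modal_string (results : List (Int × Int)) (out : String) : Prop := out = build_modal_string_alt results
instance (results : List (Int × Int)) (out : String) : Decidable (Spec_build_modal_string results out) := by unfold Spec_build_modal_string; infer_instance

-- ===== CLAIM (what is proved, stated in full; the proofs are below) =====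
def Claim_equal_build_modal_string : Prop := ∀ (results : List (Int × Int)), Dom_build_modal_string results → Spec_build_modal_string results (build_modal_string results)

-- ===== LEMMAS AND PROOFS =====

theorem pvFirstMax_mem (best : Int × Int) (t : List (Int × Int)) :
    pvFirstMax best t ∈ best :: t := by
  induction t generalizing best with
  | nil => simp [pvFirstMax]
  | cons x xs ih =>
      have h := ih (if best.2 < x.2 then x else best)
      simp only [pvFirstMax] at h ⊢
      simp only [List.foldl_cons]
      rcases List.mem_cons.mp h with h' | h'
      · rw [h']; split_ifs <;> simp
      · simp [h']

theorem pvFirstMax_max (best : Int × Int) (t : List (Int × Int)) :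
    ∀ y ∈ best :: t, y.2 ≤ (pvFirstMax best t).2 := by
  induction t generalizing best with
  | nil => simp [pvFirstMax]
  | cons x xs ih =>
      intro y hy
      have hself := ih (if best.2 < x.2 then x else best)
        (if best.2 < x.2 then x else best) List.mem_cons_self
      simp only [pvFirstMax] at hself ⊢
      simp only [List.foldl_cons]
      rcases List.mem_cons.mp hy with h | h
      · subst h
        refine le_trans ?_ hself
        split_ifs with hlt <;> omega
      · rcases List.mem_cons.mp h with h' | h'
        · subst h'
          refine le_trans ?_ hself
          split_ifs with hlt <;> omega
        · have := ih (if best.2 < x.2 then x else best) y (List.mem_cons_of_mem _ h')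
          simpa [pvFirstMax] using this

theorem pvFirstMax_snoc (best : Int × Int) (t : List (Int × Int)) (x : Int × Int) :
    pvFirstMax best (t ++ [x]) =
      (if (pvFirstMax best t).2 < x.2 then x else pvFirstMax best t) := by
  simp [pvFirstMax]

-- sorted(l ++ [x], reverse=True) inserts x into sorted(l, reverse=True)
theorem pvSorted_rev_snoc (l : List (Int × Int)) (x : Int × Int) :
    PySem.List.sorted (l ++ [x]) (fun p => p.2) true =
      PySem.List.insertBy (fun a b => decide (b.2 < a.2)) x
        (PySem.List.sorted l (fun p => p.2) true) := by
  rw [PySem.List.sorted_rev_eq_foldl_insertBy, PySem.List.sorted_rev_eq_foldl_insertBy,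
    List.foldl_append]
  rfl

-- the heart: the head of the stable descending sort is the first maximum, and the
-- rest is the sort of the list with that element erased
theorem pvSorted_rev_eq_firstMax_cons (t : List (Int × Int)) :
    ∀ h : Int × Int,
      PySem.List.sorted (h :: t) (fun p => p.2) true =
        pvFirstMax h t :: PySem.List.sorted ((h :: t).erase (pvFirstMax h t)) (fun p => p.2) true := by
  induction t using List.reverseRecOn with
  | nil =>
      intro h
      simp [pvFirstMax, PySem.List.sorted, PySem.List.insertBy]
  | append_singleton t x ih =>
      intro h
      have hsnoc : h :: (t ++ [x]) = (h :: t) ++ [x] := by simp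
      rw [hsnoc, pvSorted_rev_snoc, ih h, pvFirstMax_snoc]
      by_cases hlt : (pvFirstMax h t).2 < x.2
      · -- x is the new maximum; it goes to the front, and x ∉ h :: t
        have hx_notmem : x ∉ h :: t := by
          intro hx
          have := pvFirstMax_max h t x hx
          omega
        rw [if_pos hlt]
        have herase : ((h :: t) ++ [x]).erase x = h :: t := by
          rw [List.erase_append_right _ hx_notmem]; simp
        rw [herase, ih h]
        simp only [PySem.List.insertBy]
        rw [if_pos (by simpa using hlt)]
      · -- the old first maximum stays; x is inserted into the erased-sort
        rw [if_neg hlt]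
        have hmem : pvFirstMax h t ∈ h :: t := pvFirstMax_mem h t
        have herase : ((h :: t) ++ [x]).erase (pvFirstMax h t) =
            ((h :: t).erase (pvFirstMax h t)) ++ [x] :=
          List.erase_append_left _ hmem
        rw [herase, pvSorted_rev_snoc]
        simp only [PySem.List.insertBy]
        rw [if_neg (by simpa using hlt)]

-- B's selection loop computes exactly the first n elements of A's sort, formatted
theorem pvSelect_eq_take (n : Nat) :
    ∀ l : List (Int × Int),
      pvSelect n l = ((PySem.List.sorted l (fun p => p.2) true).take n).map pvFmt := by
  induction n with
  | zero => intro l; simp [pvSelect]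
  | succ n ih =>
      intro l
      cases l with
      | nil => simp [pvSelect, PySem.List.sorted]
      | cons h t =>
          rw [pvSorted_rev_eq_firstMax_cons t h]
          simp only [pvSelect, List.take_succ_cons, List.map_cons]
          exact congrArg _ (ih _)

-- ===== VERDICT (by name: the statement is the Claim_ definition above) =====
theorem build_modal_string_spec : Claim_equal_build_modal_string := by
  intro results _
  show build_modal_string results = build_modal_string_alt results
  unfold build_modal_string build_modal_string_alt
  rw [pvSelect_eq_take]
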